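-- pv_equiv track=rewrite | github.com/EDEN757/AInalyst2 | download_filings.py | is_matching_form
-- ===== SOURCE A (Python) =====
-- def is_matching_form(form: str, wanted_forms: list[str]) -> bool:
--     """
--     Check if a form type matches our wanted forms, including amended versions.
--     E.g., both "10-K" and "10-K/A" match if "10-K" is wanted.
--     """
--     form_upper = form.upper()
--     for wanted in wanted_forms:
--         if wanted == "CF":
--             continue
--         # Match exact form or amended version (with /A suffix)
--         if form_upper == wanted or form_upper.startswith(f"{wanted}/"):
--             return True
--     return False
-- ===== SOURCE B (Python) =====
-- def is_matching_form(form: str, wanted_forms: list[str]) -> bool: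
--     """
--     Check if a form type matches our wanted forms, including amended versions.
--     Set-indexed rewrite: test form.upper() itself, then each slash-delimited
--     prefix of it, against a set of the wanted forms (excluding "CF").
--     """
--     wanted = {w for w in wanted_forms if w != "CF"}
--     fu = form.upper()
--     if fu in wanted:
--         return True
--     prefix = ""
--     for ch in fu:
--         if ch == '/' and prefix in wanted:
--             return True
--         prefix += ch
--     return False
-- ===== Notes on version B (the rewrite author's own statement) =====
-- stated objective: alternative
-- what changed: Instead of scanning wanted_forms and testing equality/startswith per entry, B builds a set of wanted forms (excluding "CF") once and probes it with form.upper() and with each slash-delimited prefix of it.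
import Mathlib
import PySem

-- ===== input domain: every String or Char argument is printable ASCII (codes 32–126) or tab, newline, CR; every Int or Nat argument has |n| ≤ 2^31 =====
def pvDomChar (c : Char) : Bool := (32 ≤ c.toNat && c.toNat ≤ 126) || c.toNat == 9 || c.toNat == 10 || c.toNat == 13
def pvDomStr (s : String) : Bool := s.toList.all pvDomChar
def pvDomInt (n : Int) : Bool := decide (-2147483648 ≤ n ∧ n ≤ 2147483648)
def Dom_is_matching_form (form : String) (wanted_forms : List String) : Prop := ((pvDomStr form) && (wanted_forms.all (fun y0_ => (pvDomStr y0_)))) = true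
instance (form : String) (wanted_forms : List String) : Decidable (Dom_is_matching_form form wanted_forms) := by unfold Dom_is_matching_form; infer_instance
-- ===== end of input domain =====

-- B replaces A's per-entry scan of wanted_forms by one set of wanted forms (minus "CF")
-- probed with form.upper() and each slash-delimited prefix of it (objective: alternative).


-- ===== PORT A =====
-- A's loop over wanted_forms: skip "CF", return True on exact match or on "wanted/" prefix.
def isMatchingLoopA (fu : List Char) : List String → Bool
  | [] => false
  | w :: rest =>
    if w.toList = ['C', 'F'] then isMatchingLoopA fu rest
    else if fu = w.toList || PySem.Chars.startswith fu (w.toList ++ ['/']) then true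
    else isMatchingLoopA fu rest

def is_matching_form (form : String) (wanted_forms : List String) : Bool :=
  isMatchingLoopA (PySem.Str.upper form).toList wanted_forms

-- ===== PORT B =====
-- B's loop over the characters of form.upper(): at each '/', probe the accumulated prefix.
def isMatchingLoopB (wanted : PySem.Set (List Char)) : List Char → List Char → Bool
  | _, [] => false
  | prefix_, ch :: rest =>
    if ch = '/' ∧ PySem.Set.contains wanted prefix_ then true
    else isMatchingLoopB wanted (prefix_ ++ [ch]) rest

def is_matching_form_alt (form : String) (wanted_forms : List String) : Bool :=
  let wanted : PySem.Set (List Char) :=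
    PySem.Set.ofList ((wanted_forms.filter (fun w => w ≠ "CF")).map String.toList)
  let fu := (PySem.Str.upper form).toList
  if PySem.Set.contains wanted fu then true
  else isMatchingLoopB wanted [] fu

-- ===== PRECONDITION & SPEC =====
def Spec_is_matching_form (form : String) (wanted_forms : List String) (out : Bool) : Prop := out = is_matching_form_alt form wanted_forms
instance (form : String) (wanted_forms : List String) (out : Bool) : Decidable (Spec_is_matching_form form wanted_forms out) := by unfold Spec_is_matching_form; infer_instance

-- ===== CLAIM (what is proved, stated in full; the proofs are below) =====
def Claim_equal_is_matching_form : Prop := ∀ (form : String) (wanted_forms : List String), Dom_is_matching_form form wanted_forms → Spec_is_matching_form form wanted_forms (is_matching_form form wanted_forms)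

-- ===== LEMMAS AND PROOFS =====

-- A's loop returns true iff some non-"CF" wanted form matches exactly or as a "w/" prefix.
theorem loopA_iff (fu : List Char) (ws : List String) :
    isMatchingLoopA fu ws = true ↔
      ∃ w ∈ ws, w.toList ≠ ['C', 'F'] ∧
        (fu = w.toList ∨ ∃ t, fu = w.toList ++ '/' :: t) := by
  induction ws with
  | nil => simp [isMatchingLoopA]
  | cons w rest ih =>
    simp only [isMatchingLoopA]
    by_cases hcf : w.toList = ['C', 'F']
    · simp [hcf, ih]
    · by_cases hm : fu = w.toList ∨ PySem.Chars.startswith fu (w.toList ++ ['/']) = true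
      · have hm' : fu = w.toList ∨ ∃ t, fu = w.toList ++ '/' :: t := by
          rcases hm with h | h
          · exact Or.inl h
          · refine Or.inr ?_
            rcases (PySem.Chars.startswith_iff fu (w.toList ++ ['/'])).1 h with ⟨t, ht⟩
            exact ⟨t, by simpa using ht.symm⟩
        rw [if_neg hcf]
        constructor
        · intro _; exact ⟨w, List.mem_cons_self, hcf, hm'⟩
        · intro _
          rcases hm with h | h <;> simp [h]
      · push Not at hm
        have hm1 : fu ≠ w.toList := hm.1
        have hm2 : ¬ ∃ t, fu = w.toList ++ '/' :: t := by
          intro ⟨t, ht⟩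
          exact hm.2 ((PySem.Chars.startswith_iff fu (w.toList ++ ['/'])).2 ⟨t, by simp [ht]⟩)
        rw [if_neg hcf, if_neg (by simp [hm1, hm.2])]
        rw [ih]
        constructor
        · rintro ⟨v, hv, hvcf, hvm⟩; exact ⟨v, List.mem_cons_of_mem _ hv, hvcf, hvm⟩
        · rintro ⟨v, hv, hvcf, hvm⟩
          rcases List.mem_cons.1 hv with rfl | hv'
          · rcases hvm with h | ⟨t, ht⟩
            · exact absurd h hm1
            · exact absurd ⟨t, ht⟩ hm2
          · exact ⟨v, hv', hvcf, hvm⟩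

-- B's loop returns true iff the remaining input splits at a '/' whose accumulated prefix is in the set.
theorem loopB_iff (S : PySem.Set (List Char)) (pre l : List Char) :
    isMatchingLoopB S pre l = true ↔
      ∃ a b, l = a ++ '/' :: b ∧ PySem.Set.contains S (pre ++ a) = true := by
  induction l generalizing pre with
  | nil =>
    simp [isMatchingLoopB]
  | cons c t ih =>
    simp only [isMatchingLoopB]
    by_cases h : c = '/' ∧ PySem.Set.contains S pre = true
    · simp only [if_pos h, true_iff]
      exact ⟨[], t, by simp [h.1], by simpa using h.2⟩
    · rw [if_neg h, ih]
      constructor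
      · rintro ⟨a, b, rfl, hc⟩
        exact ⟨c :: a, b, by simp, by simpa using hc⟩
      · rintro ⟨a, b, hab, hc⟩
        cases a with
        | nil =>
          simp at hab
          exact absurd ⟨hab.1, by simpa using hc⟩ h
        | cons a0 a' =>
          simp only [List.cons_append, List.cons.injEq] at hab
          exact ⟨a', b, hab.2, by simpa [hab.1] using hc⟩

theorem mem_wantedSet (ws : List String) (v : List Char) :
    PySem.Set.contains
        (PySem.Set.ofList ((ws.filter (fun w => w ≠ "CF")).map String.toList)) v = true ↔
      ∃ w ∈ ws, w.toList ≠ ['C', 'F'] ∧ v = w.toList := by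
  rw [PySem.Set.contains_iff, PySem.Set.mem_ofList]
  simp only [List.mem_map, List.mem_filter]
  constructor
  · rintro ⟨w, ⟨hw, hne⟩, rfl⟩
    refine ⟨w, hw, ?_, rfl⟩
    intro h
    have : w = "CF" := String.toList_inj.mp h
    simp [this] at hne
  · rintro ⟨w, hw, hcf, rfl⟩
    refine ⟨w, ⟨hw, ?_⟩, rfl⟩
    simp only [ne_eq, decide_not, Bool.not_eq_eq_eq_not, Bool.not_true, decide_eq_false_iff_not]
    intro h; exact hcf (by simp [h])

-- ===== VERDICT (by name: the statement is the Claim_ definition above) =====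
theorem is_matching_form_spec : Claim_equal_is_matching_form := by
  intro form ws _
  unfold Spec_is_matching_form is_matching_form is_matching_form_alt
  rw [Bool.eq_iff_iff]
  set fu := (PySem.Str.upper form).toList with hfu
  set S := PySem.Set.ofList ((ws.filter (fun w => w ≠ "CF")).map String.toList) with hS
  rw [loopA_iff]
  by_cases hex : PySem.Set.contains S fu = true
  · simp only [if_pos hex, iff_true]
    rcases (mem_wantedSet ws fu).1 hex with ⟨w, hw, hcf, hv⟩
    exact ⟨w, hw, hcf, Or.inl hv⟩
  · rw [if_neg hex, loopB_iff]
    constructor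
    · rintro ⟨w, hw, hcf, hm⟩
      rcases hm with h | ⟨t, ht⟩
      · exact absurd ((mem_wantedSet ws fu).2 ⟨w, hw, hcf, h⟩) hex
      · exact ⟨w.toList, t, ht, (mem_wantedSet ws w.toList).2 ⟨w, hw, hcf, by simp⟩⟩
    · rintro ⟨a, b, hab, hc⟩
      rcases (mem_wantedSet ws a).1 (by simpa only [List.nil_append] using hc) with ⟨w, hw, hcf, rfl⟩
      exact ⟨w, hw, hcf, Or.inr ⟨b, hab⟩⟩
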